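-- pv_equiv track=rewrite | github.com/61515/simpleDB | simpleDB.py | read_partSentence
-- ===== SOURCE A (Python) =====
-- def read_partSentence(sql_sentence, index):
--     keywords = ["Select", "From", "Where", "LIMIT", "Having", "Order", "Group"]
--
--     while index < len(sql_sentence):
--         # 找寻前五个所必须的关键字
--         for i in range(7):
--             # 判断字符串长度
--             if index + len(keywords[i]) > len(sql_sentence):
--                 continue
--
--             matched = False
--             for j in range(len(keywords[i])):
--                 c_in_keyword = keywords[i][j]
--                 if c_in_keyword.lower() != sql_sentence[index + j].lower():
--                     break
--                 if j == len(keywords[i]) - 1: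
--                     matched = True
--             if matched:
--                 if i <= 4:
--                     return index
--                 else:
--                     # 处理中间有空位的位置
--                     tmp_index = index + len(keywords[i])
--
--                     # 读入空格单元
--                     list_space = [' ', '\n', '\t']
--                     has_space = False
--                     while tmp_index < len(sql_sentence) and sql_sentence[tmp_index] in list_space:
--                         tmp_index += 1
--                         has_space = True
--                     if has_space:
--                         if tmp_index + 1 < len(sql_sentence) and sql_sentence[tmp_index].lower() == 'b' \
--                                 and sql_sentence[tmp_index + 1].lower() == 'y':
--                             return index
--         index += 1
--     # 未发现关键字
--     return index
-- ===== SOURCE B (Python) =====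
-- import re
--
-- _CLAUSE_PAT = re.compile(
--     r"select|from|where|limit|having|order[ \t\n]+by|group[ \t\n]+by",
--     re.IGNORECASE,
-- )
--
-- def read_partSentence(sql_sentence, index):
--     if index >= len(sql_sentence):
--         return index
--     m = _CLAUSE_PAT.search(sql_sentence, index)
--     return m.start() if m else len(sql_sentence)
-- ===== Notes on version B (the rewrite author's own statement) =====
-- stated objective: faster
-- what changed: Replaces the hand-written per-position nested keyword/character loops with one precompiled case-insensitive regex (select|from|where|limit|having|order[ \t\n]+by|group[ \t\n]+by) searched once from the start index, so the matching runs inside C's regex engine instead of Python-level loops.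
-- outside the precondition, e.g. on read_partSentence('from', -4): A returns -4, B returns 0
import Mathlib
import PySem

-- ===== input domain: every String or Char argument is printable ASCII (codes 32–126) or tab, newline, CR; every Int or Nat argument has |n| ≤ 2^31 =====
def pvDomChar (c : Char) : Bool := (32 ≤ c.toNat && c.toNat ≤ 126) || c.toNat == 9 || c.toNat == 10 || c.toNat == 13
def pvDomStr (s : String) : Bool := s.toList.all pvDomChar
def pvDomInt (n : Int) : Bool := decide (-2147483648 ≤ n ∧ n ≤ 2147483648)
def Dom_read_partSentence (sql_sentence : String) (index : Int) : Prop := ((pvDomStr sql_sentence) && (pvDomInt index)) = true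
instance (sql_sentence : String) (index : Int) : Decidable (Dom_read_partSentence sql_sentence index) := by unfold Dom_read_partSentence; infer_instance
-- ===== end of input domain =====

-- B replaces A's per-position nested keyword/char loops with one precompiled case-insensitive
-- regex searched from the start index (objective: faster by constant factor — C regex engine).

-- ===== PORT A =====
-- inner 'for j in range(len(keywords[i]))' loop with its 'matched' flag
-- (fuel = kw.length - j is a pure totality guard: fuel = 0 exactly when the range is exhausted)
def pvA_matchGo (cs kw : List Char) (idx : Int) : Nat → Nat → Bool
  | 0, _ => false
  | fuel + 1, j =>
    let c := kw.getD j ' '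
    if PySem.Chars.lowerChar c ≠ PySem.Chars.lowerChar (PySem.List.pyGetD cs (idx + j) ' ') then
      false
    else if j = kw.length - 1 then true
    else pvA_matchGo cs kw idx fuel (j + 1)

-- 'while tmp_index < len(...) and sql_sentence[tmp_index] in list_space' with the has_space flag
-- (fuel = len - t: fuel = 0 exactly when t ≥ len, i.e. the first loop condition is false)
def pvA_skipGo (cs : List Char) : Nat → Int → Bool → Int × Bool
  | 0, t, hs => (t, hs)
  | fuel + 1, t, hs =>
    if ([' ', '\n', '\t'].contains (PySem.List.pyGetD cs t ' ')) = true then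
      pvA_skipGo cs fuel (t + 1) true
    else (t, hs)

def pvA_skip (cs : List Char) (t : Int) (hs : Bool) : Int × Bool :=
  pvA_skipGo cs ((cs.length - t).toNat) t hs

-- the 'has_space' / 'b','y' check after an Order/Group match
def pvA_bycheck (cs : List Char) (t0 : Int) : Bool :=
  (pvA_skip cs t0 false).2
  && decide ((pvA_skip cs t0 false).1 + 1 < (cs.length : Int))
  && (PySem.Chars.lowerChar (PySem.List.pyGetD cs (pvA_skip cs t0 false).1 ' ') == 'b')
  && (PySem.Chars.lowerChar (PySem.List.pyGetD cs ((pvA_skip cs t0 false).1 + 1) ' ') == 'y')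

def pvA_keywords : List (Nat × List Char) :=
  [(0, ['S','e','l','e','c','t']), (1, ['F','r','o','m']), (2, ['W','h','e','r','e']),
   (3, ['L','I','M','I','T']), (4, ['H','a','v','i','n','g']), (5, ['O','r','d','e','r']),
   (6, ['G','r','o','u','p'])]

-- 'for i in range(7)' with continue/return
def pvA_for (cs : List Char) (idx : Int) : List (Nat × List Char) → Option Int
  | [] => none
  | (i, kw) :: rest =>
    if idx + (kw.length : Int) > (cs.length : Int) then pvA_for cs idx rest
    else if pvA_matchGo cs kw idx kw.length 0 then
      if i ≤ 4 then some idx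
      else if pvA_bycheck cs (idx + (kw.length : Int)) then some idx
      else pvA_for cs idx rest
    else pvA_for cs idx rest

-- 'while index < len(sql_sentence)' outer loop (fuel = len - index: 0 exactly when the guard fails)
def pvA_loop (cs : List Char) : Nat → Int → Int
  | 0, index => index
  | fuel + 1, index =>
    match pvA_for cs index pvA_keywords with
    | some r => r
    | none => pvA_loop cs fuel (index + 1)

def read_partSentence (sql_sentence : String) (index : Int) : Int :=
  pvA_loop sql_sentence.toList ((sql_sentence.toList.length - index).toNat) index

-- ===== PORT B =====
-- Port of Source B's compiled regex r"select|from|where|limit|having|order[ \t\n]+by|group[ \t\n]+by"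
-- with re.IGNORECASE, searched from max(index,0) (Pattern.search clamps a negative pos to 0).
-- The engine's case-insensitive literal branch is char-by-char lowered comparison (pvB_pref);
-- the branch '[ \t\n]+by' is ported as maximal-space-run-then-"by", exact here because 'b','y'
-- are not in the class so backtracking into the run can never succeed.
def pvB_isSpace (c : Char) : Bool := c == ' ' || c == '\n' || c == '\t'

def pvB_pref : List Char → List Char → Bool
  | _, [] => true
  | [], _ :: _ => false
  | c :: t, k :: kw => (PySem.Chars.lowerChar c == k) && pvB_pref t kw

def pvB_afterSpaces : List Char → Bool
  | [] => false
  | c :: t => if pvB_isSpace c then pvB_afterSpaces t else pvB_pref (c :: t) ['b', 'y']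

def pvB_spaceBy : List Char → Bool
  | [] => false
  | c :: t => pvB_isSpace c && pvB_afterSpaces t

def pvB_matchAt (t : List Char) : Bool :=
  pvB_pref t ['s','e','l','e','c','t'] || pvB_pref t ['f','r','o','m'] ||
  pvB_pref t ['w','h','e','r','e'] || pvB_pref t ['l','i','m','i','t'] ||
  pvB_pref t ['h','a','v','i','n','g'] ||
  (pvB_pref t ['o','r','d','e','r'] && pvB_spaceBy (t.drop 5)) ||
  (pvB_pref t ['g','r','o','u','p'] && pvB_spaceBy (t.drop 5))

-- Pattern.search: leftmost position at which some alternative matches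
-- (fuel = len - pos: 0 exactly when the scan has run off the end of the subject)
def pvB_searchGo (cs : List Char) : Nat → Int → Option Int
  | 0, _ => none
  | fuel + 1, pos =>
    if pvB_matchAt (cs.drop pos.toNat) then some pos else pvB_searchGo cs fuel (pos + 1)

def pvB_search (cs : List Char) (pos : Int) : Option Int :=
  pvB_searchGo cs ((cs.length - pos).toNat) pos

def read_partSentence_alt (sql_sentence : String) (index : Int) : Int :=
  let cs := sql_sentence.toList
  if index ≥ (cs.length : Int) then index
  else
    match pvB_search cs (max index 0) with
    | some p => p
    | none => (cs.length : Int)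

-- ===== PRECONDITION & SPEC =====
-- Pre_ restricts to the natural domain 0 ≤ index: a negative start index is meaningless for this
-- scanner, and there A relies on Python's negative-index wraparound (returning e.g. -4 on
-- ("from", -4)) or raises IndexError, while B's regex search clamps the position to 0.
def Pre_read_partSentence (sql_sentence : String) (index : Int) : Prop := 0 ≤ index
instance (sql_sentence : String) (index : Int) : Decidable (Pre_read_partSentence sql_sentence index) := by
  unfold Pre_read_partSentence; infer_instance

def pvWitness_read_partSentence : String × Int := ("Select * From t Order  by x", 0)

def Spec_read_partSentence (sql_sentence : String) (index : Int) (out : Int) : Prop :=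
  out = read_partSentence_alt sql_sentence index
instance (sql_sentence : String) (index : Int) (out : Int) : Decidable (Spec_read_partSentence sql_sentence index out) := by
  unfold Spec_read_partSentence; infer_instance

-- ===== CLAIM (what is proved, stated in full; the proofs are below) =====
def Claim_equal_read_partSentence : Prop := ∀ (sql_sentence : String) (index : Int), Dom_read_partSentence sql_sentence index → Pre_read_partSentence sql_sentence index → Spec_read_partSentence sql_sentence index (read_partSentence sql_sentence index)

-- ===== LEMMAS AND PROOFS =====

theorem pv_contains_eq_isSpace (c : Char) :
    ([' ', '\n', '\t'].contains c) = pvB_isSpace c := by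
  unfold pvB_isSpace
  by_cases h1 : c = ' ' <;> by_cases h2 : c = '\n' <;> by_cases h3 : c = '\t' <;>
    simp [h1, h2, h3]

theorem pv_beq_comm (c k : Char) (X : Bool) :
    ((PySem.Chars.lowerChar c == k) && X) = ((decide (k = PySem.Chars.lowerChar c)) && X) := by
  rcases eq_or_ne (PySem.Chars.lowerChar c) k with h | h
  · simp [h]
  · rw [beq_false_of_ne h, decide_eq_false (fun hh => h hh.symm)]

theorem pvB_pref_iff (kw : List Char) : ∀ t : List Char,
    pvB_pref t kw = decide (kw <+: t.map PySem.Chars.lowerChar) := by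
  induction kw with
  | nil => intro t; simp [pvB_pref]
  | cons k kw ih =>
    intro t
    cases t with
    | nil => simp [pvB_pref]
    | cons c t =>
      show (PySem.Chars.lowerChar c == k && pvB_pref t kw) = _
      rw [ih, pv_beq_comm]
      simp [List.cons_prefix_cons]

theorem pvA_skip_unfold (cs : List Char) (t : Int) (hs : Bool) :
    pvA_skip cs t hs
      = if t < (cs.length : Int) ∧ ([' ', '\n', '\t'].contains (PySem.List.pyGetD cs t ' ')) = true
        then pvA_skip cs (t + 1) true else (t, hs) := by
  by_cases hlt : t < (cs.length : Int)
  · have h1 : ((cs.length : Int) - t).toNat = ((cs.length : Int) - (t + 1)).toNat + 1 := by omega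
    unfold pvA_skip
    rw [h1]
    by_cases hc : ([' ', '\n', '\t'].contains (PySem.List.pyGetD cs t ' ')) = true
    · simp [pvA_skipGo, hc, hlt]
    · simp [pvA_skipGo, hc, hlt]
  · have h1 : ((cs.length : Int) - t).toNat = 0 := by omega
    unfold pvA_skip
    rw [h1]
    simp [pvA_skipGo, hlt]

theorem pvA_matchGo_eq (cs kw : List Char) (i : Int) (hi : 0 ≤ i)
    (hlen : i.toNat + kw.length ≤ cs.length) :
    ∀ fuel j, j < kw.length → fuel = kw.length - j →
    pvA_matchGo cs kw i fuel j
      = decide ((kw.drop j).map PySem.Chars.lowerChar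
          <+: (cs.drop (i.toNat + j)).map PySem.Chars.lowerChar) := by
  intro fuel
  induction fuel with
  | zero => intro j hj hf; omega
  | succ fuel ih =>
    intro j hj hf
    have hjc : j < cs.length := by omega
    have hic : i.toNat + j < cs.length := by omega
    have hkwd : kw.drop j = kw[j] :: kw.drop (j + 1) := (List.drop_eq_getElem_cons hj).symm ▸ rfl
    have hcsd : cs.drop (i.toNat + j) = cs[i.toNat + j] :: cs.drop (i.toNat + j + 1) :=
      (List.drop_eq_getElem_cons hic).symm ▸ rfl
    have hget : PySem.List.pyGetD cs (i + (j : Int)) ' ' = cs[i.toNat + j] := by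
      rw [PySem.List.pyGetD_eq_getElem cs ' ' (by omega) (by omega)]
      congr 1
      omega
    have hgd : kw.getD j ' ' = kw[j] := List.getD_eq_getElem kw ' ' hj
    rw [hkwd, hcsd]
    simp only [pvA_matchGo, hgd, hget, List.map_cons, List.cons_prefix_cons]
    by_cases hne : PySem.Chars.lowerChar kw[j] = PySem.Chars.lowerChar cs[i.toNat + j]
    · simp only [hne, ite_not, if_pos rfl]
      by_cases hlast : j = kw.length - 1
      · rw [if_pos hlast]
        have hd0 : List.drop (j + 1) kw = [] := List.drop_eq_nil_of_le (by omega)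
        have hd1 : List.drop (j + 1) (List.map PySem.Chars.lowerChar kw) = [] :=
          List.drop_eq_nil_of_le (by simp; omega)
        simp [hne, hd0, hd1]
      · have hj1 : j + 1 < kw.length := by omega
        rw [if_neg hlast, ih (j + 1) hj1 (by omega)]
        have : i.toNat + j + 1 = i.toNat + (j + 1) := by omega
        simp [hne, this]
    · simp [hne]

theorem pv_keyword_eq (cs : List Char) (i : Int) (hi : 0 ≤ i) (kwA kwB : List Char)
    (hk : kwA.map PySem.Chars.lowerChar = kwB) (hne : kwA ≠ []) :
    pvB_pref (cs.drop i.toNat) kwB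
      = (!decide (i + (kwA.length : Int) > (cs.length : Int)) && pvA_matchGo cs kwA i kwA.length 0) := by
  by_cases hg : i + (kwA.length : Int) > (cs.length : Int)
  · simp only [hg, decide_true, Bool.not_true, Bool.false_and]
    rw [pvB_pref_iff, decide_eq_false]
    intro hpre
    have hle := hpre.length_le
    have h0 : 0 < kwA.length := List.length_pos_iff.mpr hne
    subst hk
    simp only [List.length_map, List.length_drop] at hle
    omega
  · simp only [hg, decide_false, Bool.not_false, Bool.true_and]
    rw [pvB_pref_iff, ← hk]
    have h0 : 0 < kwA.length := List.length_pos_iff.mpr hne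
    rw [pvA_matchGo_eq cs kwA i hi (by omega) kwA.length 0 h0 (by omega)]
    simp

theorem pv_after_eq (cs : List Char) : ∀ fuel (t : Int), 0 ≤ t → cs.length - t.toNat = fuel →
    ((pvA_skip cs t true).2
      && decide ((pvA_skip cs t true).1 + 1 < (cs.length : Int))
      && (PySem.Chars.lowerChar (PySem.List.pyGetD cs (pvA_skip cs t true).1 ' ') == 'b')
      && (PySem.Chars.lowerChar (PySem.List.pyGetD cs ((pvA_skip cs t true).1 + 1) ' ') == 'y'))
      = pvB_afterSpaces (cs.drop t.toNat) := by
  intro fuel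
  induction fuel with
  | zero =>
    intro t ht hf
    have hge : ¬ t < (cs.length : Int) := by omega
    have hnil : cs.drop t.toNat = [] := List.drop_eq_nil_of_le (by omega)
    rw [pvA_skip_unfold]
    simp [hge, hnil, pvB_afterSpaces, show ¬ (t + 1 < (cs.length : Int)) by omega]
  | succ fuel ih =>
    intro t ht hf
    have hlt : t < (cs.length : Int) := by omega
    have htc : t.toNat < cs.length := by omega
    have hcons : cs.drop t.toNat = cs[t.toNat] :: cs.drop (t.toNat + 1) :=
      (List.drop_eq_getElem_cons htc).symm ▸ rfl
    have hget : PySem.List.pyGetD cs t ' ' = cs[t.toNat] := by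
      rw [PySem.List.pyGetD_eq_getElem cs ' ' ht (by omega)]
    rw [pvA_skip_unfold, hcons]
    by_cases hsp : pvB_isSpace cs[t.toNat] = true
    · have hc : ([' ', '\n', '\t'].contains (PySem.List.pyGetD cs t ' ')) = true := by
        rw [hget, pv_contains_eq_isSpace]; exact hsp
      rw [if_pos ⟨hlt, hc⟩]
      have h1 : (t + 1).toNat = t.toNat + 1 := by omega
      have := ih (t + 1) (by omega) (by omega)
      rw [h1] at this
      rw [this]
      simp [pvB_afterSpaces, hsp]
    · have hc : ¬ (([' ', '\n', '\t'].contains (PySem.List.pyGetD cs t ' ')) = true) := by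
        rw [hget, pv_contains_eq_isSpace]; exact hsp
      rw [if_neg (by tauto)]
      simp only [pvB_afterSpaces, hsp, if_neg]
      -- skip stopped at t: compare the explicit 'b','y' test with pvB_pref _ ['b','y']
      rcases hrest : cs.drop (t.toNat + 1) with _ | ⟨d, r⟩
      · have hlen : cs.length ≤ t.toNat + 1 := by
          have := List.drop_eq_nil_iff.mp hrest
          omega
        have hnlt : ¬ (t + 1 < (cs.length : Int)) := by omega
        simp [pvB_pref, hget, hnlt]
      · have hlen : t.toNat + 1 < cs.length := by
          by_contra hcon
          rw [List.drop_eq_nil_of_le (by omega)] at hrest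
          exact (List.cons_ne_nil d r) hrest.symm
        have hd : d = cs[t.toNat + 1] := by
          have h3 := (List.drop_eq_getElem_cons hlen).symm.trans hrest
          injection h3 with h4 _
          exact h4.symm
        have hget1 : PySem.List.pyGetD cs (t + 1) ' ' = cs[t.toNat + 1] := by
          rw [PySem.List.pyGetD_eq_getElem cs ' ' (by omega) (by omega)]
          congr 1
          omega
        simp [pvB_pref, hget, hget1, hd, show (t + 1 + 1 ≤ (cs.length : Int)) by omega,
          Bool.and_assoc, ite_eq_iff]
        exact fun _ _ => by omega

theorem pv_bycheck_eq (cs : List Char) (t : Int) (ht : 0 ≤ t) :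
    pvA_bycheck cs t = pvB_spaceBy (cs.drop t.toNat) := by
  unfold pvA_bycheck
  by_cases hlt : t < (cs.length : Int)
  · have htc : t.toNat < cs.length := by omega
    have hcons : cs.drop t.toNat = cs[t.toNat] :: cs.drop (t.toNat + 1) :=
      (List.drop_eq_getElem_cons htc).symm ▸ rfl
    have hget : PySem.List.pyGetD cs t ' ' = cs[t.toNat] := by
      rw [PySem.List.pyGetD_eq_getElem cs ' ' ht (by omega)]
    by_cases hsp : pvB_isSpace cs[t.toNat] = true
    · have hc : ([' ', '\n', '\t'].contains (PySem.List.pyGetD cs t ' ')) = true := by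
        rw [hget, pv_contains_eq_isSpace]; exact hsp
      rw [pvA_skip_unfold, if_pos ⟨hlt, hc⟩]
      have h1 : (t + 1).toNat = t.toNat + 1 := by omega
      have := pv_after_eq cs (cs.length - (t + 1).toNat) (t + 1) (by omega) rfl
      rw [h1] at this
      rw [this, hcons]
      simp [pvB_spaceBy, hsp]
    · have hc : ¬ (([' ', '\n', '\t'].contains (PySem.List.pyGetD cs t ' ')) = true) := by
        rw [hget, pv_contains_eq_isSpace]; exact hsp
      rw [pvA_skip_unfold, if_neg (by tauto), hcons]
      simp [pvB_spaceBy, hsp]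
  · have hnil : cs.drop t.toNat = [] := List.drop_eq_nil_of_le (by omega)
    rw [pvA_skip_unfold, if_neg (by tauto), hnil]
    simp [pvB_spaceBy]

theorem pvA_branch_le (cs : List Char) (idx : Int) (i : Nat) (kw : List Char)
    (rest : List (Nat × List Char)) (hile : i ≤ 4) (b : Bool)
    (hb : b = (!decide (idx + (kw.length : Int) > (cs.length : Int)) && pvA_matchGo cs kw idx kw.length 0)) :
    pvA_for cs idx ((i, kw) :: rest) = if b = true then some idx else pvA_for cs idx rest := by
  subst hb
  by_cases hg : idx + (kw.length : Int) > (cs.length : Int) <;>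
    by_cases hm : pvA_matchGo cs kw idx kw.length 0 = true <;>
      simp [pvA_for, hg, hm, hile]

theorem pvA_branch_gt (cs : List Char) (idx : Int) (i : Nat) (kw : List Char)
    (rest : List (Nat × List Char)) (hile : ¬ i ≤ 4) (b bc : Bool)
    (hb : b = (!decide (idx + (kw.length : Int) > (cs.length : Int)) && pvA_matchGo cs kw idx kw.length 0))
    (hbc : pvA_bycheck cs (idx + (kw.length : Int)) = bc) :
    pvA_for cs idx ((i, kw) :: rest) = if (b && bc) = true then some idx else pvA_for cs idx rest := by
  subst hb
  subst hbc
  by_cases hg : idx + (kw.length : Int) > (cs.length : Int) <;>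
    by_cases hm : pvA_matchGo cs kw idx kw.length 0 = true <;>
      by_cases hc : pvA_bycheck cs (idx + (kw.length : Int)) = true <;>
        simp [pvA_for, hg, hm, hc, hile]

theorem pv_if_or (a c : Bool) (x y : Option Int) :
    (if a = true then x else if c = true then x else y) = (if (a || c) = true then x else y) := by
  cases a <;> simp

theorem pv_scan_eq (cs : List Char) (i : Int) (hi : 0 ≤ i) :
    pvA_for cs i pvA_keywords = (if pvB_matchAt (cs.drop i.toNat) then some i else none) := by
  have hS := pv_keyword_eq cs i hi ['S','e','l','e','c','t'] ['s','e','l','e','c','t'] (by decide) (by decide)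
  have hF := pv_keyword_eq cs i hi ['F','r','o','m'] ['f','r','o','m'] (by decide) (by decide)
  have hW := pv_keyword_eq cs i hi ['W','h','e','r','e'] ['w','h','e','r','e'] (by decide) (by decide)
  have hL := pv_keyword_eq cs i hi ['L','I','M','I','T'] ['l','i','m','i','t'] (by decide) (by decide)
  have hH := pv_keyword_eq cs i hi ['H','a','v','i','n','g'] ['h','a','v','i','n','g'] (by decide) (by decide)
  have hO := pv_keyword_eq cs i hi ['O','r','d','e','r'] ['o','r','d','e','r'] (by decide) (by decide)
  have hG := pv_keyword_eq cs i hi ['G','r','o','u','p'] ['g','r','o','u','p'] (by decide) (by decide)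
  have hby : pvA_bycheck cs (i + 5) = pvB_spaceBy ((cs.drop i.toNat).drop 5) := by
    have hdd : (cs.drop i.toNat).drop 5 = cs.drop ((i + 5).toNat) := by
      rw [List.drop_drop]
      congr 1
      omega
    rw [pv_bycheck_eq cs (i + 5) (by omega), hdd]
  have hO5 : pvA_bycheck cs (i + ((['O','r','d','e','r'].length : Nat) : Int))
      = pvB_spaceBy ((cs.drop i.toNat).drop 5) := by simpa using hby
  have hG5 : pvA_bycheck cs (i + ((['G','r','o','u','p'].length : Nat) : Int))
      = pvB_spaceBy ((cs.drop i.toNat).drop 5) := by simpa using hby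
  unfold pvA_keywords
  rw [pvA_branch_le cs i 0 _ _ (by norm_num) _ hS,
      pvA_branch_le cs i 1 _ _ (by norm_num) _ hF,
      pvA_branch_le cs i 2 _ _ (by norm_num) _ hW,
      pvA_branch_le cs i 3 _ _ (by norm_num) _ hL,
      pvA_branch_le cs i 4 _ _ (by norm_num) _ hH,
      pvA_branch_gt cs i 5 _ _ (by norm_num) _ _ hO hO5,
      pvA_branch_gt cs i 6 _ _ (by norm_num) _ _ hG hG5]
  rw [show pvA_for cs i [] = none from rfl]
  rw [pv_if_or, pv_if_or, pv_if_or, pv_if_or, pv_if_or, pv_if_or]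
  unfold pvB_matchAt
  simp [Bool.or_assoc]

theorem pv_loop_eq (cs : List Char) : ∀ fuel (i : Int), 0 ≤ i → ((cs.length : Int) - i).toNat = fuel →
    pvA_loop cs fuel i
      = (if i ≥ (cs.length : Int) then i
         else match pvB_search cs i with
              | some p => p
              | none => (cs.length : Int)) := by
  intro fuel
  induction fuel with
  | zero =>
    intro i hi hf
    have : i ≥ (cs.length : Int) := by omega
    simp [pvA_loop, this]
  | succ fuel ih =>
    intro i hi hf
    have hlt : i < (cs.length : Int) := by omega
    have hsg : pvB_search cs i = pvB_searchGo cs (fuel + 1) i := by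
      unfold pvB_search
      rw [hf]
    rw [show pvA_loop cs (fuel + 1) i
          = (match pvA_for cs i pvA_keywords with
             | some r => r
             | none => pvA_loop cs fuel (i + 1)) from rfl,
        pv_scan_eq cs i hi, hsg,
        show pvB_searchGo cs (fuel + 1) i
          = (if pvB_matchAt (cs.drop i.toNat) then some i else pvB_searchGo cs fuel (i + 1)) from rfl]
    by_cases hm : pvB_matchAt (cs.drop i.toNat) = true
    · rw [if_pos hm, if_pos hm]
      rw [if_neg (not_le.mpr hlt)]
    · rw [if_neg hm, if_neg hm]
      show pvA_loop cs fuel (i + 1) = _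
      rw [ih (i + 1) (by omega) (by omega), if_neg (not_le.mpr hlt)]
      by_cases hend : i + 1 ≥ (cs.length : Int)
      · rw [if_pos hend]
        have hf0 : fuel = 0 := by omega
        have h1 : i + 1 = (cs.length : Int) := by omega
        subst hf0
        show (i + 1 : Int) = _
        simp [pvB_searchGo, h1]
      · rw [if_neg hend,
            show pvB_search cs (i + 1) = pvB_searchGo cs fuel (i + 1) from by
              unfold pvB_search
              rw [show (((cs.length : Int)) - (i + 1)).toNat = fuel from by omega]]

-- ===== VERDICT (by name: the statement is the Claim_ definition above) =====
theorem read_partSentence_spec : Claim_equal_read_partSentence := by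
  intro s index _ hpre
  unfold Pre_read_partSentence at hpre
  unfold Spec_read_partSentence read_partSentence read_partSentence_alt
  rw [pv_loop_eq s.toList ((s.toList.length : Int) - index).toNat index hpre rfl]
  simp only [ge_iff_le, max_eq_left hpre]
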